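-- pv_equiv track=rewrite | github.com/rishav3602/DSA-Assignments | assignment20.py | isLevelOrderBST
-- ===== SOURCE A (Python) =====
-- def isLevelOrderBST(levelorder):
--     n = len(levelorder)
--
--     if n <= 1:
--         return True
--
--     i = 1
--     while i < n and levelorder[i] < levelorder[0]:
--         i += 1
--
--     for j in range(i, n):
--         if levelorder[j] < levelorder[0]:
--             return False
--
--     left_subtree = True
--     if i > 1:
--         left_subtree = isLevelOrderBST(levelorder[1:i])
--
--     right_subtree = True
--     if i < n:
--         right_subtree = isLevelOrderBST(levelorder[i:])
--
--     return left_subtree and right_subtree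
-- ===== SOURCE B (Python) =====
-- def isLevelOrderBST(levelorder):
--     # Single left-to-right pass: a monotonic stack of pending upper bounds
--     # (ancestors whose right subtree we have not entered yet) plus a running
--     # lower bound.  O(n) instead of A's repeated scanning and slicing.
--     stack = []
--     lower = None
--     for x in levelorder:
--         if lower is not None and x < lower:
--             return False
--         while stack and stack[-1] <= x:
--             lower = stack.pop()
--         stack.append(x)
--     return True
-- ===== Notes on version B (the rewrite author's own statement) =====
-- stated objective: faster
-- what changed: Replaced A's recursive split (scan for the split point, rescan the rest, recurse on two list slices) by a single left-to-right pass with a monotonic stack of pending upper bounds and a running lower bound.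
import Mathlib
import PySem

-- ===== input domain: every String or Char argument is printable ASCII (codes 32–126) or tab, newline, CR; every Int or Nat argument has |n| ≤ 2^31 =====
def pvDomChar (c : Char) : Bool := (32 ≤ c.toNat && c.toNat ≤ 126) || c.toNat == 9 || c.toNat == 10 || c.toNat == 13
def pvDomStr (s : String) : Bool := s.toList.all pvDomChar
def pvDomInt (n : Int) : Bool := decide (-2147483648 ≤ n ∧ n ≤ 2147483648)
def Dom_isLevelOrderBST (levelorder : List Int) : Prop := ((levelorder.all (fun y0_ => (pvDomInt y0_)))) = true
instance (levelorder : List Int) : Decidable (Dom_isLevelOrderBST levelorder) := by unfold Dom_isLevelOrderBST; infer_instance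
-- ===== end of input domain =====

-- B replaces A's recursive split-and-rescan (O(n^2)) by a single monotonic-stack pass (O(n)); return value only, no mutation.

-- ===== PORT A =====
-- while i < n and levelorder[i] < levelorder[0]: i += 1
-- (fuel only makes the loop total; it never runs out: n - i iterations remain and the caller passes fuel = len(levelorder))
def awhile (fuel : Nat) (a : List Int) (v : Int) (n i : Int) : Int :=
  match fuel with
  | 0 => i
  | fuel + 1 =>
      if i < n then
        match PySem.List.pyGet? a i with
        | some x => if x < v then awhile fuel a v n (i + 1) else i
        | none => i   -- unreachable: i is always in range
      else i

-- for j in range(i, n): if levelorder[j] < levelorder[0]: return False   (same fuel discipline)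
def acheck (fuel : Nat) (a : List Int) (v : Int) (j n : Int) : Bool :=
  match fuel with
  | 0 => true
  | fuel + 1 =>
      if j < n then
        match PySem.List.pyGet? a j with
        | some x => if x < v then false else acheck fuel a v (j + 1) n
        | none => true   -- unreachable: j is always in range
      else true

-- the recursion of A, structural on a fuel that never runs out (each recursive call is on a strictly shorter slice,
-- so fuel = len(levelorder) suffices)
def isLevelOrderBSTFuel : Nat → List Int → Bool
  | 0, _ => true
  | fuel + 1, levelorder =>
    let n : Int := levelorder.length
    if n ≤ 1 then true
    else
      let root := (PySem.List.pyGet? levelorder 0).getD 0  -- levelorder[0]; in range since n ≥ 2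
      let i := awhile levelorder.length levelorder root n 1
      if acheck levelorder.length levelorder root i n then
        let left := if 1 < i then isLevelOrderBSTFuel fuel (PySem.List.slice levelorder (some 1) (some i)) else true
        let right := if i < n then isLevelOrderBSTFuel fuel (PySem.List.slice levelorder (some i) none) else true
        left && right
      else false

def isLevelOrderBST (levelorder : List Int) : Bool := isLevelOrderBSTFuel levelorder.length levelorder

-- ===== PORT B =====
-- while stack and stack[-1] <= x: lower = stack.pop()   (stack head = Python stack top)
def popAll (x : Int) : List Int → Option Int → List Int × Option Int
  | [], lower => ([], lower)
  | t :: s, lower => if t ≤ x then popAll x s (some t) else (t :: s, lower)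

-- lower is not None and x < lower
def lowViol (x : Int) : Option Int → Bool
  | some l => decide (x < l)
  | none => false

def altGo : List Int → List Int → Option Int → Bool
  | [], _, _ => true
  | x :: rest, stack, lower =>
    if lowViol x lower then false
    else
      let p := popAll x stack lower
      altGo rest (x :: p.1) p.2

def isLevelOrderBST_alt (levelorder : List Int) : Bool := altGo levelorder [] none

-- ===== PRECONDITION & SPEC =====
def Spec_isLevelOrderBST (levelorder : List Int) (out : Bool) : Prop := out = isLevelOrderBST_alt levelorder
instance (levelorder : List Int) (out : Bool) : Decidable (Spec_isLevelOrderBST levelorder out) := by unfold Spec_isLevelOrderBST; infer_instance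

-- ===== CLAIM (what is proved, stated in full; the proofs are below) =====
def Claim_equal_isLevelOrderBST : Prop := ∀ (levelorder : List Int), Dom_isLevelOrderBST levelorder → Spec_isLevelOrderBST levelorder (isLevelOrderBST levelorder)

-- ===== LEMMAS AND PROOFS =====

-- reference specification: preorder split at the first element ≥ root
def valid : List Int → Bool
  | [] => true
  | v :: rest =>
    let L := rest.takeWhile (fun x => decide (x < v))
    let R := rest.dropWhile (fun x => decide (x < v))
    R.all (fun x => !decide (x < v)) && valid L && valid R
termination_by xs => xs.length
decreasing_by
  · exact Nat.lt_succ_of_le ((rest.takeWhile_sublist _).length_le)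
  · exact Nat.lt_succ_of_le ((rest.dropWhile_sublist _).length_le)

-- half-open interval test: lo ≤ x < hi (none = unbounded)
def inb (lo hi : Option Int) (x : Int) : Bool :=
  (match lo with | some l => decide (l ≤ x) | none => true) &&
  (match hi with | some h => decide (x < h) | none => true)

-- Cons lo hi xs r: greedily consuming from xs a BST-preorder subtree whose values lie in [lo,hi) leaves remainder r
inductive Cons : Option Int → Option Int → List Int → List Int → Prop
  | nil (lo hi : Option Int) : Cons lo hi [] []
  | stop (lo hi : Option Int) (x : Int) (xs : List Int) (h : inb lo hi x = false) : Cons lo hi (x :: xs) (x :: xs)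
  | step (lo hi : Option Int) (x : Int) (xs r1 r : List Int) (h : inb lo hi x = true)
      (hL : Cons lo (some x) xs r1) (hR : Cons (some x) hi r1 r) : Cons lo hi (x :: xs) r

theorem valid_nil : valid [] = true := by rw [valid.eq_def]

theorem valid_cons (v : Int) (rest : List Int) : valid (v :: rest) =
    ((rest.dropWhile (fun x => decide (x < v))).all (fun x => !decide (x < v)) &&
     valid (rest.takeWhile (fun x => decide (x < v))) &&
     valid (rest.dropWhile (fun x => decide (x < v)))) := by
  rw [valid]

-- inb characterization
theorem inb_iff (lo hi : Option Int) (x : Int) :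
    inb lo hi x = true ↔ ((∀ l, lo = some l → l ≤ x) ∧ (∀ h, hi = some h → x < h)) := by
  cases lo <;> cases hi <;> simp [inb]

theorem inb_none_none (x : Int) : inb none none x = true := by simp [inb]

theorem inb_upper_false (lo : Option Int) (v x : Int) (h : ¬ x < v) : inb lo (some v) x = false := by
  cases lo <;> simp [inb] <;> omega

theorem inb_shrink_upper (lo hi : Option Int) (v y : Int)
    (hv : inb lo hi v = true) (hy : inb lo (some v) y = true) : inb lo hi y = true := by
  rw [inb_iff] at *
  obtain ⟨h1, h2⟩ := hv; obtain ⟨h3, h4⟩ := hy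
  exact ⟨h3, fun h hh => lt_trans (h4 v rfl) (h2 h hh)⟩

theorem inb_shrink_lower (lo hi : Option Int) (v y : Int)
    (hv : inb lo hi v = true) (hy : inb (some v) hi y = true) : inb lo hi y = true := by
  rw [inb_iff] at *
  obtain ⟨h1, h2⟩ := hv; obtain ⟨h3, h4⟩ := hy
  exact ⟨fun l hl => le_trans (h1 l hl) (h3 v rfl), h4⟩

-- inversion lemmas for Cons
theorem Cons_cons_stop (lo hi : Option Int) (x : Int) (xs r : List Int) (hx : inb lo hi x = false) :
    Cons lo hi (x :: xs) r ↔ r = x :: xs := by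
  constructor
  · intro h
    cases h with
    | stop => rfl
    | step _ _ _ _ _ _ h => rw [h] at hx; exact absurd hx (by simp)
  · intro h; subst h; exact Cons.stop _ _ _ _ hx

theorem Cons_cons_step (lo hi : Option Int) (x : Int) (xs r : List Int) (hx : inb lo hi x = true) :
    Cons lo hi (x :: xs) r ↔ ∃ m, Cons lo (some x) xs m ∧ Cons (some x) hi m r := by
  constructor
  · intro h
    cases h with
    | stop _ _ _ _ h => rw [h] at hx; exact absurd hx (by simp)
    | step _ _ _ _ r1 _ _ hL hR => exact ⟨r1, hL, hR⟩
  · rintro ⟨m, hL, hR⟩; exact Cons.step _ _ _ _ _ _ hx hL hR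

-- chain of pending intervals described by the stack
def RemP : List Int → Option Int → List Int → List Int → Prop
  | xs, lo, [], r => Cons lo none xs r
  | xs, lo, t :: s, r => ∃ m, Cons lo (some t) xs m ∧ RemP m (some t) s r

theorem RemP_nil : ∀ (s : List Int) (lo : Option Int), RemP [] lo s [] := by
  intro s
  induction s with
  | nil => intro lo; exact Cons.nil _ _
  | cons t s ih => intro lo; exact ⟨[], Cons.nil _ _, ih _⟩

-- stack invariant: lower bound below every stack element, stack weakly increasing top-down
def StInv : Option Int → List Int → Prop
  | _, [] => True
  | lo, t :: s => (∀ l, lo = some l → l ≤ t) ∧ StInv (some t) s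

theorem remP_lower : ∀ (s : List Int) (lo : Option Int) (l x : Int) (rest r : List Int),
    StInv lo s → lo = some l → x < l → RemP (x :: rest) lo s r → r = x :: rest := by
  intro s
  induction s with
  | nil =>
      intro lo l x rest r _ hlo hx hr
      have : inb lo none x = false := by subst hlo; simp [inb]; omega
      exact (Cons_cons_stop _ _ _ _ _ this).1 hr
  | cons t s ih =>
      intro lo l x rest r hInv hlo hx hr
      obtain ⟨m, hc, hrem⟩ := hr
      have hlt : l ≤ t := hInv.1 l hlo
      have : inb lo (some t) x = false := by
        subst hlo; cases h : inb (some l) (some t) x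
        · rfl
        · rw [inb_iff] at h; have := h.1 l rfl; omega
      rw [Cons_cons_stop _ _ _ _ _ this] at hc
      subst hc
      exact ih (some t) t x rest r hInv.2 rfl (by omega) hrem

theorem popInv : ∀ (s : List Int) (lo : Option Int) (x : Int), StInv lo s →
    (∀ l, lo = some l → l ≤ x) → StInv (popAll x s lo).2 (x :: (popAll x s lo).1) := by
  intro s
  induction s with
  | nil => intro lo x _ hc; exact ⟨hc, trivial⟩
  | cons t s ih =>
      intro lo x hInv hc
      by_cases ht : t ≤ x
      · simp only [popAll, ht, if_true]
        exact ih (some t) x hInv.2 (by rintro l ⟨rfl⟩; exact ht)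
      · simp only [popAll, ht, if_false]
        exact ⟨hc, ⟨by rintro l ⟨rfl⟩; omega, hInv.2⟩⟩

theorem chainStep : ∀ (s : List Int) (lo : Option Int) (x : Int) (rest r : List Int),
    (∀ l, lo = some l → l ≤ x) →
    (RemP (x :: rest) lo s r ↔ RemP rest (popAll x s lo).2 (x :: (popAll x s lo).1) r) := by
  intro s
  induction s with
  | nil =>
      intro lo x rest r hc
      have hx : inb lo none x = true := by rw [inb_iff]; exact ⟨hc, by simp⟩
      show Cons lo none (x :: rest) r ↔ _
      rw [Cons_cons_step _ _ _ _ _ hx]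
      simp only [popAll, RemP]
  | cons t s ih =>
      intro lo x rest r hc
      by_cases ht : t ≤ x
      · simp only [popAll, ht, if_true]
        have hx : inb lo (some t) x = false := inb_upper_false _ _ _ (by omega)
        show (∃ m, Cons lo (some t) (x :: rest) m ∧ RemP m (some t) s r) ↔ _
        constructor
        · rintro ⟨m, hm, hrem⟩
          rw [Cons_cons_stop _ _ _ _ _ hx] at hm; subst hm
          exact (ih (some t) x rest r (by rintro l ⟨rfl⟩; exact ht)).1 hrem
        · intro h
          exact ⟨x :: rest, (Cons_cons_stop _ _ _ _ _ hx).2 rfl,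
            (ih (some t) x rest r (by rintro l ⟨rfl⟩; exact ht)).2 h⟩
      · simp only [popAll, ht, if_false]
        have hx : inb lo (some t) x = true := by rw [inb_iff]; exact ⟨hc, by rintro h ⟨rfl⟩; omega⟩
        show (∃ m, Cons lo (some t) (x :: rest) m ∧ RemP m (some t) s r) ↔
          (∃ m1, Cons lo (some x) rest m1 ∧ ∃ m, Cons (some x) (some t) m1 m ∧ RemP m (some t) s r)
        constructor
        · rintro ⟨m, hm, hrem⟩
          rw [Cons_cons_step _ _ _ _ _ hx] at hm
          obtain ⟨m1, h1, h2⟩ := hm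
          exact ⟨m1, h1, m, h2, hrem⟩
        · rintro ⟨m1, h1, m, h2, hrem⟩
          exact ⟨m, (Cons_cons_step _ _ _ _ _ hx).2 ⟨m1, h1, h2⟩, hrem⟩

-- main loop lemma for B: success of the scan = the chain consumes everything
theorem altGo_iff_RemP : ∀ (xs s : List Int) (lo : Option Int), StInv lo s →
    (altGo xs s lo = true ↔ RemP xs lo s []) := by
  intro xs
  induction xs with
  | nil =>
      intro s lo _
      simp only [show ∀ s lo, altGo [] s lo = true from fun _ _ => rfl, true_iff]
      exact RemP_nil s lo
  | cons x rest ih =>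
      intro s lo hInv
      rw [show altGo (x :: rest) s lo =
        (if lowViol x lo then false
         else altGo rest (x :: (popAll x s lo).1) (popAll x s lo).2) from rfl]
      by_cases hg : lowViol x lo = true
      · rw [if_pos hg]
        obtain ⟨l, hlo, hxl⟩ : ∃ l, lo = some l ∧ x < l := by
          cases lo with
          | none => simp [lowViol] at hg
          | some l => simp [lowViol] at hg; exact ⟨l, rfl, hg⟩
        constructor
        · intro h; exact absurd h (by simp)
        · intro h
          have := remP_lower s lo l x rest [] hInv hlo hxl h
          simp at this
      · rw [if_neg hg]
        have hc : ∀ l, lo = some l → l ≤ x := by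
          rintro l rfl; simp [lowViol] at hg; omega
        rw [chainStep s lo x rest [] hc]
        exact ih _ _ (popInv s lo x hInv hc)

-- takeWhile/dropWhile split along a stated boundary
theorem tw_split (p : Int → Bool) : ∀ (p1 p2 : List Int), (∀ y ∈ p1, p y = true) →
    (∀ h, p2.head? = some h → p h = false) →
    (p1 ++ p2).takeWhile p = p1 ∧ (p1 ++ p2).dropWhile p = p2 := by
  intro p1
  induction p1 with
  | nil =>
      intro p2 _ hh
      cases p2 with
      | nil => simp
      | cons h t =>
          have := hh h rfl
          simp [this]
  | cons a p1 ih =>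
      intro p2 h1 hh
      have ha : p a = true := h1 a (by simp)
      have := ih p2 (fun y hy => h1 y (by simp [hy])) hh
      simp [ha, this.1, this.2]

-- the takeWhile/dropWhile split of a list at its first element ≥ v
theorem tw_props (v : Int) (rest : List Int) :
    ∃ L1 L2, rest = L1 ++ L2 ∧
      rest.takeWhile (fun x => decide (x < v)) = L1 ∧
      rest.dropWhile (fun x => decide (x < v)) = L2 ∧
      (∀ y ∈ L1, y < v) ∧
      (∀ h, L2.head? = some h → ¬ h < v) := by
  refine ⟨_, _, (List.takeWhile_append_dropWhile).symm, rfl, rfl, ?_, ?_⟩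
  · intro y hy; simpa using List.mem_takeWhile_imp hy
  · intro h hh
    cases hd : rest.dropWhile (fun x => decide (x < v)) with
    | nil => rw [hd] at hh; simp at hh
    | cons a t =>
        rw [hd] at hh; simp at hh
        have hne : rest.dropWhile (fun x => decide (x < v)) ≠ [] := by rw [hd]; simp
        have := List.head_dropWhile_not (fun x => decide (x < v)) hne
        simp only [hd, List.head_cons] at this
        rw [← hh]
        simpa using this

-- soundness: a valid in-bounds block followed by an out-of-bounds head is consumed exactly
theorem S_lemma : ∀ (k : Nat) (L R : List Int) (lo hi : Option Int), L.length ≤ k →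
    (∀ x ∈ L, inb lo hi x = true) → valid L = true →
    (∀ h, R.head? = some h → inb lo hi h = false) → Cons lo hi (L ++ R) R := by
  intro k
  induction k with
  | zero =>
      intro L R lo hi hk _ _ hR
      have : L = [] := by cases L <;> simp_all
      subst this
      cases R with
      | nil => exact Cons.nil _ _
      | cons h t => exact Cons.stop _ _ _ _ (hR h rfl)
  | succ k ih =>
      intro L R lo hi hk hb hv hR
      cases L with
      | nil =>
          cases R with
          | nil => exact Cons.nil _ _
          | cons h t => exact Cons.stop _ _ _ _ (hR h rfl)
      | cons v rest =>
          have hvb : inb lo hi v = true := hb v (by simp)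
          obtain ⟨L1, L2, hres, htw, hdw, hmem1, hhead2⟩ := tw_props v rest
          rw [valid, htw, hdw] at hv
          simp only [Bool.and_eq_true] at hv
          obtain ⟨⟨hall, hv1⟩, hv2⟩ := hv
          have hlen : rest.length = L1.length + L2.length := by rw [hres]; simp
          have hk' : rest.length ≤ k := by simp at hk; omega
          apply Cons.step _ _ _ _ (L2 ++ R) _ hvb
          · show Cons lo (some v) (rest ++ R) (L2 ++ R)
            have hre : rest ++ R = L1 ++ (L2 ++ R) := by rw [hres, List.append_assoc]
            rw [hre]
            apply ih L1 (L2 ++ R) lo (some v) (by omega)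
            · intro y hy
              have h2 := hb y (by simp [hres, hy])
              rw [inb_iff] at h2 ⊢
              refine ⟨h2.1, ?_⟩
              intro h' he; injection he with he; subst he; exact hmem1 y hy
            · exact hv1
            · intro h hh
              cases hL2c : L2 with
              | cons h2 t2 =>
                  rw [hL2c] at hh; simp at hh
                  have hge := hhead2 h2 (by rw [hL2c]; rfl)
                  exact inb_upper_false _ _ _ (by omega)
              | nil =>
                  rw [hL2c] at hh; simp at hh
                  have hf := hR h hh
                  cases hin : inb lo (some v) h
                  · rfl
                  · rw [inb_shrink_upper lo hi v h hvb hin] at hf; exact absurd hf (by simp)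
          · apply ih L2 R (some v) hi (by omega)
            · intro y hy
              have h2 := hb y (by simp [hres, hy])
              have hyv : ¬ y < v := by
                have := List.all_eq_true.1 hall y hy
                simpa using this
              rw [inb_iff] at h2 ⊢
              refine ⟨?_, h2.2⟩
              intro l he; injection he with he; subst he; omega
            · exact hv2
            · intro h hh
              have hf := hR h hh
              cases hin : inb (some v) hi h
              · rfl
              · rw [inb_shrink_lower lo hi v h hvb hin] at hf; exact absurd hf (by simp)

-- completeness: whatever the greedy consumption ate was a valid in-bounds block
theorem C_lemma : ∀ {lo hi : Option Int} {xs r : List Int}, Cons lo hi xs r →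
    (∀ h, r.head? = some h → inb lo hi h = false) →
    ∃ p, xs = p ++ r ∧ (∀ x ∈ p, inb lo hi x = true) ∧ valid p = true := by
  intro lo hi xs r hc
  induction hc with
  | nil => intro _; exact ⟨[], rfl, by simp, valid_nil⟩
  | stop lo hi x xs h => intro _; exact ⟨[], rfl, by simp, valid_nil⟩
  | step lo hi x xs r1 r hx hL hR ihL ihR =>
      intro hstop
      have hstopR : ∀ h, r.head? = some h → inb (some x) hi h = false := by
        intro h hh
        have hf := hstop h hh
        cases hin : inb (some x) hi h
        · rfl
        · rw [inb_shrink_lower lo hi x h hx hin] at hf; exact absurd hf (by simp)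
      obtain ⟨p2, hr1, b2, v2⟩ := ihR hstopR
      have hstopL : ∀ h, r1.head? = some h → inb lo (some x) h = false := by
        intro h hh
        cases hp2 : p2 with
        | cons h2 t2 =>
            rw [hr1, hp2] at hh; simp at hh
            have := b2 h2 (by simp [hp2])
            rw [inb_iff] at this
            subst hh
            exact inb_upper_false _ _ _ (by have := this.1 x rfl; omega)
        | nil =>
            rw [hr1, hp2] at hh; simp at hh
            have hf := hstop h hh
            cases hin : inb lo (some x) h
            · rfl
            · rw [inb_shrink_upper lo hi x h hx hin] at hf; exact absurd hf (by simp)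
      obtain ⟨p1, hxs, b1, v1⟩ := ihL hstopL
      refine ⟨x :: p1 ++ p2, ?_, ?_, ?_⟩
      · rw [hxs, hr1]; simp [List.append_assoc]
      · intro y hy
        simp at hy
        rcases hy with rfl | hy | hy
        · exact hx
        · exact inb_shrink_upper lo hi x y hx (b1 y hy)
        · exact inb_shrink_lower lo hi x y hx (b2 y hy)
      · have hsp := tw_split (fun y => decide (y < x)) p1 p2
          (by intro y hy
              have := b1 y hy; rw [inb_iff] at this
              simpa using this.2 x rfl)
          (by intro h hh
              cases hp2 : p2 with
              | nil => rw [hp2] at hh; simp at hh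
              | cons h2 t2 =>
                  rw [hp2] at hh; simp at hh
                  have hb2 := b2 h2 (by simp [hp2]); rw [inb_iff] at hb2
                  have := hb2.1 x rfl
                  rw [← hh]; simp; omega)
        rw [List.cons_append, valid_cons]
        simp only [hsp.1, hsp.2, Bool.and_eq_true]
        refine ⟨⟨?_, v1⟩, v2⟩
        rw [List.all_eq_true]
        intro y hy
        have := b2 y hy; rw [inb_iff] at this
        have := this.1 x rfl
        simp; omega

theorem valid_iff_Cons (a : List Int) : valid a = true ↔ Cons none none a [] := by
  constructor
  · intro h
    have := S_lemma a.length a [] none none (le_refl _)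
      (fun x _ => inb_none_none x) h (by intro h hh; simp at hh)
    simpa using this
  · intro h
    obtain ⟨p, hp, _, hv⟩ := C_lemma h (by intro h hh; simp at hh)
    simp at hp; subst hp; exact hv

theorem valid_eq_alt (a : List Int) : valid a = isLevelOrderBST_alt a := by
  have h1 := altGo_iff_RemP a [] none trivial
  have h2 := valid_iff_Cons a
  show valid a = altGo a [] none
  by_cases hv : valid a = true
  · rw [hv]; exact (h1.2 (h2.1 hv)).symm
  · have hg : ¬ altGo a [] none = true := fun hg => hv (h2.2 (h1.1 hg))
    simp only [Bool.not_eq_true] at hv hg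
    rw [hv, hg]

-- ===== Layer 1: the port of A computes `valid` =====

theorem awhile_spec : ∀ (t a : List Int) (v i : Int) (f : Nat), t.length ≤ f → 0 ≤ i →
    List.drop i.toNat a = t → i + t.length = a.length →
    awhile f a v a.length i = i + ((t.takeWhile (fun x => decide (x < v))).length : Int) := by
  intro t
  induction t with
  | nil =>
      intro a v i f _ h0 hd hl
      cases f with
      | zero => simp [awhile]
      | succ f =>
          rw [awhile]
          have : ¬ i < (a.length : Int) := by simp at hl; omega
          rw [if_neg this]; simp
  | cons x t ih =>
      intro a v i f hf h0 hd hl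
      cases f with
      | zero => simp at hf
      | succ f =>
          rw [awhile]
          have hin : i < (a.length : Int) := by simp at hl; omega
          rw [if_pos hin]
          have hget : PySem.List.pyGet? a i = some x := by
            rw [PySem.List.pyGet?_of_nonneg _ h0]
            have : a[i.toNat]? = (List.drop i.toNat a)[0]? := by
              rw [List.getElem?_drop]; simp
            rw [this, hd]; rfl
          rw [hget]
          by_cases hlt : x < v
          · simp only [hlt, if_true]
            have hd' : List.drop (i + 1).toNat a = t := by
              have : (i + 1).toNat = i.toNat + 1 := by omega
              rw [this, ← List.drop_drop (j := i.toNat) (i := 1), hd]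
              rfl
            have := ih a v (i + 1) f (by simp at hf; omega) (by omega) hd' (by simp at hl ⊢; omega)
            rw [this]
            simp [hlt]
            omega
          · simp only [hlt, if_false]
            simp [hlt]

theorem acheck_spec : ∀ (t a : List Int) (v j : Int) (f : Nat), t.length ≤ f → 0 ≤ j →
    List.drop j.toNat a = t → j + t.length = a.length →
    acheck f a v j a.length = t.all (fun x => !decide (x < v)) := by
  intro t
  induction t with
  | nil =>
      intro a v j f _ h0 hd hl
      cases f with
      | zero => simp [acheck]
      | succ f =>
          rw [acheck]
          have : ¬ j < (a.length : Int) := by simp at hl; omega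
          rw [if_neg this]; simp
  | cons x t ih =>
      intro a v j f hf h0 hd hl
      cases f with
      | zero => simp at hf
      | succ f =>
          rw [acheck]
          have hin : j < (a.length : Int) := by simp at hl; omega
          rw [if_pos hin]
          have hget : PySem.List.pyGet? a j = some x := by
            rw [PySem.List.pyGet?_of_nonneg _ h0]
            have : a[j.toNat]? = (List.drop j.toNat a)[0]? := by
              rw [List.getElem?_drop]; simp
            rw [this, hd]; rfl
          rw [hget]
          by_cases hlt : x < v
          · simp only [hlt, if_true]
            simp [hlt]
          · simp only [hlt, if_false]
            have hd' : List.drop (j + 1).toNat a = t := by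
              have : (j + 1).toNat = j.toNat + 1 := by omega
              rw [this, ← List.drop_drop (j := j.toNat) (i := 1), hd]
              rfl
            have := ih a v (j + 1) f (by simp at hf; omega) (by omega) hd' (by simp at hl ⊢; omega)
            rw [this]
            simp [hlt]

theorem portA_eq_valid_fuel : ∀ (k : Nat) (a : List Int), a.length ≤ k →
    isLevelOrderBSTFuel k a = valid a := by
  intro k
  induction k with
  | zero =>
      intro a hk
      have : a = [] := by cases a <;> simp_all
      subst this
      rw [isLevelOrderBSTFuel, valid_nil]
  | succ k ih =>
      intro a hk
      rw [isLevelOrderBSTFuel]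
      by_cases h1 : ((a.length : Int)) ≤ 1
      · rw [if_pos h1]
        cases a with
        | nil => rw [valid_nil]
        | cons v rest =>
            cases rest with
            | nil => rw [valid]; simp [valid_nil]
            | cons b t => simp at h1; omega
      · rw [if_neg h1]
        cases a with
        | nil => simp at h1
        | cons v rest =>
            have hroot : (PySem.List.pyGet? (v :: rest) 0).getD 0 = v := by
              rw [PySem.List.pyGet?_zero_cons]; rfl
            rw [hroot]
            obtain ⟨L1, L2, hres, htw, hdw, hmem1, hhead2⟩ := tw_props v rest
            have hlen : rest.length = L1.length + L2.length := by rw [hres]; simp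
            have hiq : awhile (v :: rest).length (v :: rest) v ((v :: rest).length : Int) 1 =
                1 + (L1.length : Int) := by
              have := awhile_spec rest (v :: rest) v 1 (v :: rest).length (by simp)
                (by omega) (by simp) (by simp; omega)
              rw [htw] at this; exact this
            have hdropi : List.drop (1 + (L1.length : Int)).toNat (v :: rest) = L2 := by
              have h2 : (1 + (L1.length : Int)).toNat = 1 + L1.length := by omega
              rw [h2]
              show List.drop (1 + L1.length) (v :: rest) = L2
              have h3 : List.drop (1 + L1.length) (v :: rest) = List.drop L1.length rest := by
                have h4 : 1 + L1.length = L1.length + 1 := by omega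
                rw [h4]; rfl
              rw [h3, hres, List.drop_left]
            have hcq : acheck (v :: rest).length (v :: rest) v (1 + (L1.length : Int))
                ((v :: rest).length : Int) = L2.all (fun x => !decide (x < v)) :=
              acheck_spec L2 (v :: rest) v (1 + (L1.length : Int)) (v :: rest).length
                (by simp; omega) (by omega) hdropi (by simp [hlen]; omega)
            have hslice_left : PySem.List.slice (v :: rest) (some 1) (some (1 + (L1.length : Int))) = L1 := by
              rw [PySem.List.slice_toNat _ (by omega) (by omega)]
              have h2 : (1 : Int).toNat = 1 := rfl
              have h3 : (1 + (L1.length : Int)).toNat = 1 + L1.length := by omega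
              rw [h2, h3]
              show List.take (1 + L1.length - 1) rest = L1
              have h4 : 1 + L1.length - 1 = L1.length := by omega
              rw [h4]
              have := List.prefix_iff_eq_take.1 (List.takeWhile_prefix (l := rest) (fun x => decide (x < v)))
              rw [htw] at this
              exact this.symm
            have hslice_right : PySem.List.slice (v :: rest) (some (1 + (L1.length : Int))) none = L2 := by
              rw [PySem.List.slice_from _ (by omega)]
              exact hdropi
            have hk' : rest.length ≤ k := by simp at hk; omega
            have e1 : (if (1 : Int) < 1 + (L1.length : Int) then
                isLevelOrderBSTFuel k (PySem.List.slice (v :: rest) (some 1) (some (1 + (L1.length : Int))))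
                else true) = valid L1 := by
              split_ifs with hc
              · rw [hslice_left]; exact ih L1 (by omega)
              · have h0 : L1.length = 0 := by omega
                have hLe : L1 = [] := List.eq_nil_of_length_eq_zero h0
                rw [hLe, valid_nil]
            have e2 : (if 1 + (L1.length : Int) < ((v :: rest).length : Int) then
                isLevelOrderBSTFuel k (PySem.List.slice (v :: rest) (some (1 + (L1.length : Int))) none)
                else true) = valid L2 := by
              split_ifs with hc
              · rw [hslice_right]; exact ih L2 (by omega)
              · have h0 : L2.length = 0 := by simp at hc; omega
                have hRe : L2 = [] := List.eq_nil_of_length_eq_zero h0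
                rw [hRe, valid_nil]
            rw [valid, htw, hdw]
            simp only [hiq, hcq, e1, e2]
            cases hall : L2.all (fun x => !decide (x < v))
            · simp
            · simp

theorem portA_eq_valid (a : List Int) : isLevelOrderBST a = valid a :=
  portA_eq_valid_fuel a.length a (le_refl _)

-- ===== VERDICT (by name: the statement is the Claim_ definition above) =====
theorem isLevelOrderBST_spec : Claim_equal_isLevelOrderBST := by
  intro levelorder _
  show isLevelOrderBST levelorder = isLevelOrderBST_alt levelorder
  rw [portA_eq_valid, valid_eq_alt]
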